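-- pv_equiv track=rewrite | github.com/scrawlsbenches/Opus-code-test | cortical/reasoning/crisis_manager.py | suggest_prevention
-- ===== SOURCE A (Python) =====
-- from typing import Any, Callable, Dict, List, Optional, Tuple
--
-- def suggest_prevention(risk_factors: List[str]) -> List[str]:
--     """Suggest preventive measures."""
--     suggestions = []
--     prevention_map = {
--         'repeated_failures': ['Stop and analyze root cause', 'Consider alternative approach'],
--         'time_pressure': ['Reduce scope to essentials', 'Time-box remaining work'],
--         'high_complexity': ['Break into smaller steps', 'Prototype complex parts first'],
--         'scope_creep': ['Return to original scope', 'Create follow-up tasks'],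
--         'unexpected_files': ['Review why files are needed', 'Document rationale'],
--         'new_concepts': ['Allocate learning time', 'Find working examples'],
--         'time_overrun': ['Re-estimate work', 'Consider partial delivery'],
--         'active_blockers': ['Find workarounds', 'Escalate blocker resolution'],
--     }
--     for factor in risk_factors:
--         if factor in prevention_map:
--             suggestions.extend(prevention_map[factor])
--     if len(risk_factors) >= 3:
--         suggestions.append('Consider pausing for planning session')
--     seen = set()
--     unique = []
--     for s in suggestions:
--         if s not in seen:
--             seen.add(s)
--             unique.append(s)
--     return unique
-- ===== SOURCE B (Python) =====
-- def suggest_prevention(risk_factors):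
--     """Suggest preventive measures.
--
--     Every risk factor maps to its own suggestions (the map's value lists are
--     pairwise disjoint and duplicate-free, and the planning note is distinct
--     from all of them), so deduplicating the FACTORS and flattening their
--     suggestion lists yields the deduplicated suggestion list directly --
--     no seen-set over suggestions is needed.
--     """
--     prevention_map = {
--         'repeated_failures': ['Stop and analyze root cause', 'Consider alternative approach'],
--         'time_pressure': ['Reduce scope to essentials', 'Time-box remaining work'],
--         'high_complexity': ['Break into smaller steps', 'Prototype complex parts first'],
--         'scope_creep': ['Return to original scope', 'Create follow-up tasks'],
--         'unexpected_files': ['Review why files are needed', 'Document rationale'],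
--         'new_concepts': ['Allocate learning time', 'Find working examples'],
--         'time_overrun': ['Re-estimate work', 'Consider partial delivery'],
--         'active_blockers': ['Find workarounds', 'Escalate blocker resolution'],
--     }
--     out = []
--     for factor in dict.fromkeys(risk_factors):
--         out += prevention_map.get(factor, [])
--     if len(risk_factors) >= 3:
--         out.append('Consider pausing for planning session')
--     return out
-- ===== Notes on version B (the rewrite author's own statement) =====
-- stated objective: simpler
-- what changed: A flattens suggestions for every factor and then deduplicates the suggestion list with a seen-set in a second pass; B instead deduplicates the risk factors themselves (dict.fromkeys) and flattens their suggestion lists with no suggestion-level dedup at all, which is equivalent because the map's value lists are pairwise disjoint and duplicate-free and the planning note is distinct from all of them.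
import Mathlib
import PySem

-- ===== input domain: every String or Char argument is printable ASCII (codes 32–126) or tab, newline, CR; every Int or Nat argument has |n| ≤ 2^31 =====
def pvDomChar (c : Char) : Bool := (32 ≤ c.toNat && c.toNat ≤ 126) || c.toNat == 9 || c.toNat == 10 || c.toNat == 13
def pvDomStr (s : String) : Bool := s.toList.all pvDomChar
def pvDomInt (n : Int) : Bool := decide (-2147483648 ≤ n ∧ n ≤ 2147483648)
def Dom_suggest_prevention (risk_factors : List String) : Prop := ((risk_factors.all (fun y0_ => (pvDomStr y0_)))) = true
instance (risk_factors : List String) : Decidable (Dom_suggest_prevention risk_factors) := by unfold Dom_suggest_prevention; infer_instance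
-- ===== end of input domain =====

-- B drops A's suggestion-level seen-set dedup: it dedups the FACTORS (dict.fromkeys) and flattens
-- their suggestion lists, which is equivalent because the map's value lists are pairwise disjoint
-- and duplicate-free and the planning note occurs in none of them; objective: simpler.

-- the prevention_map literal (the same dict literal appears in Source A and Source B)
def pvPM : PySem.Dict String (List String) := PySem.Dict.ofList
  [ ("repeated_failures", ["Stop and analyze root cause", "Consider alternative approach"]),
    ("time_pressure", ["Reduce scope to essentials", "Time-box remaining work"]),
    ("high_complexity", ["Break into smaller steps", "Prototype complex parts first"]),
    ("scope_creep", ["Return to original scope", "Create follow-up tasks"]),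
    ("unexpected_files", ["Review why files are needed", "Document rationale"]),
    ("new_concepts", ["Allocate learning time", "Find working examples"]),
    ("time_overrun", ["Re-estimate work", "Consider partial delivery"]),
    ("active_blockers", ["Find workarounds", "Escalate blocker resolution"]) ]

-- ===== PORT A =====
-- A's dedup step: append s to unique only if not yet seen (state = (seen, unique))
def pvAddU (st : PySem.Set String × List String) (s : String) : PySem.Set String × List String :=
  if PySem.Set.contains st.1 s then st else (PySem.Set.add st.1 s, st.2 ++ [s])

-- build the full suggestions list, then deduplicate it in a second pass (A's two loops)
def suggest_prevention (risk_factors : List String) : List String :=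
  let suggestions := risk_factors.foldl
    (fun acc factor => if pvPM.contains factor then acc ++ pvPM.getD factor [] else acc) []
  let suggestions := if risk_factors.length ≥ 3
    then suggestions ++ ["Consider pausing for planning session"] else suggestions
  (suggestions.foldl pvAddU (PySem.Set.empty, [])).2

-- ===== PORT B =====
-- dedup the factors (dict.fromkeys), flatten their suggestion lists, append the planning note
def suggest_prevention_alt (risk_factors : List String) : List String :=
  let out := (PySem.List.dedup risk_factors).foldl
    (fun acc factor => acc ++ pvPM.getD factor []) []
  if risk_factors.length ≥ 3 then out ++ ["Consider pausing for planning session"] else out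

-- ===== PRECONDITION & SPEC =====
def Spec_suggest_prevention (risk_factors : List String) (out : List String) : Prop := out = suggest_prevention_alt risk_factors
instance (risk_factors : List String) (out : List String) : Decidable (Spec_suggest_prevention risk_factors out) := by unfold Spec_suggest_prevention; infer_instance

-- ===== CLAIM (what is proved, stated in full; the proofs are below) =====
def Claim_equal_suggest_prevention : Prop := ∀ (risk_factors : List String), Dom_suggest_prevention risk_factors → Spec_suggest_prevention risk_factors (suggest_prevention risk_factors)

-- ===== LEMMAS AND PROOFS =====

-- the map's (key, suggestion) pairs, flattened
def pvPairs : List (String × String) :=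
  [ ("repeated_failures", "Stop and analyze root cause"), ("repeated_failures", "Consider alternative approach"),
    ("time_pressure", "Reduce scope to essentials"), ("time_pressure", "Time-box remaining work"),
    ("high_complexity", "Break into smaller steps"), ("high_complexity", "Prototype complex parts first"),
    ("scope_creep", "Return to original scope"), ("scope_creep", "Create follow-up tasks"),
    ("unexpected_files", "Review why files are needed"), ("unexpected_files", "Document rationale"),
    ("new_concepts", "Allocate learning time"), ("new_concepts", "Find working examples"),
    ("time_overrun", "Re-estimate work"), ("time_overrun", "Consider partial delivery"),
    ("active_blockers", "Find workarounds"), ("active_blockers", "Escalate blocker resolution") ]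

-- every (key, value-element) pair of the map, read off its items
lemma pv_items_pairs : ∀ p ∈ pvPM.items, ∀ s ∈ p.2, (p.1, s) ∈ pvPairs := by decide

lemma pv_items_nodup : ∀ p ∈ pvPM.items, p.2.Nodup := by decide

-- any suggestion a lookup returns is one of the map's (key, suggestion) pairs
lemma pv_getD_mem (f s : String) (h : s ∈ pvPM.getD f []) : (f, s) ∈ pvPairs := by
  cases hg : pvPM.get? f with
  | none => rw [PySem.Dict.getD_of_get?_eq_none pvPM [] hg] at h; cases h
  | some v =>
    rw [PySem.Dict.getD_of_get?_eq_some pvPM [] hg] at h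
    exact pv_items_pairs (f, v) (PySem.Dict.mem_items_of_get?_eq_some pvPM hg) s h

-- the flattened pair list determines the key from the suggestion, and avoids the planning note
lemma pv_pairs_disj : ∀ p ∈ pvPairs, ∀ q ∈ pvPairs, p.2 = q.2 → p.1 = q.1 := by decide

lemma pv_pairs_plan : ∀ p ∈ pvPairs, p.2 ≠ "Consider pausing for planning session" := by decide

-- different factors have disjoint suggestion lists
lemma pv_disj (f g s : String) (hf : s ∈ pvPM.getD f []) (hg : s ∈ pvPM.getD g []) : f = g :=
  pv_pairs_disj (f, s) (pv_getD_mem f s hf) (g, s) (pv_getD_mem g s hg) rfl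

-- each suggestion list is duplicate-free
lemma pv_nodup (f : String) : (pvPM.getD f []).Nodup := by
  cases hg : pvPM.get? f with
  | none => rw [PySem.Dict.getD_of_get?_eq_none pvPM [] hg]; exact List.nodup_nil
  | some v =>
    rw [PySem.Dict.getD_of_get?_eq_some pvPM [] hg]
    exact pv_items_nodup (f, v) (PySem.Dict.mem_items_of_get?_eq_some pvPM hg)

-- the planning note is in no suggestion list
lemma pv_plan (f : String) : "Consider pausing for planning session" ∉ pvPM.getD f [] := by
  intro h
  exact pv_pairs_plan (f, _) (pv_getD_mem f _ h) rfl

-- A's dedup fold skips a block whose elements are all already seen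
lemma pv_foldl_seen (l : List String) : ∀ (st : PySem.Set String × List String),
    (∀ s ∈ l, s ∈ st.1) → l.foldl pvAddU st = st := by
  induction l with
  | nil => intro st _; rfl
  | cons x l ih =>
    intro st h
    have hx : PySem.Set.contains st.1 x = true := by
      rw [PySem.Set.contains_iff]; exact h x (by simp)
    simp only [List.foldl_cons, pvAddU, hx, if_true]
    exact ih st (fun s hs => h s (by simp [hs]))

-- A's dedup fold appends a duplicate-free block of fresh elements wholesale
lemma pv_foldl_new (l : List String) : ∀ (st : PySem.Set String × List String),
    l.Nodup → (∀ s ∈ l, s ∉ st.1) →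
    (l.foldl pvAddU st).2 = st.2 ++ l ∧
    (∀ s, s ∈ (l.foldl pvAddU st).1 ↔ s ∈ st.1 ∨ s ∈ l) := by
  induction l with
  | nil => intro st _ _; simp
  | cons x l ih =>
    intro st hnd hfresh
    have hx : PySem.Set.contains st.1 x = false := by
      rw [Bool.eq_false_iff]
      intro hc; exact hfresh x (by simp) ((PySem.Set.contains_iff _ _).1 hc)
    simp only [List.foldl_cons, pvAddU, hx, Bool.false_eq_true, if_false]
    have hnd' := (List.nodup_cons.1 hnd).2
    have hxl := (List.nodup_cons.1 hnd).1
    have hfresh' : ∀ s ∈ l, s ∉ PySem.Set.add st.1 x := by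
      intro s hs hmem
      rcases (PySem.Set.mem_add _ _ _).1 hmem with h | h
      · exact hfresh s (by simp [hs]) h
      · exact hxl (h ▸ hs)
    obtain ⟨h2, h1⟩ := ih (PySem.Set.add st.1 x, st.2 ++ [x]) hnd' hfresh'
    refine ⟨by simpa using h2, fun s => ?_⟩
    rw [h1 s, PySem.Set.mem_add]
    simp only [List.mem_cons]
    tauto

-- the output component of A's dedup fold only grows by appending
lemma pv_foldl_out (l : List String) : ∀ (seen : PySem.Set String) (out : List String),
    (l.foldl pvAddU (seen, out)).2 = out ++ (l.foldl pvAddU (seen, [])).2 ∧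
    (l.foldl pvAddU (seen, out)).1 = (l.foldl pvAddU (seen, [])).1 := by
  induction l with
  | nil => intro seen out; simp
  | cons x l ih =>
    intro seen out
    simp only [List.foldl_cons, pvAddU]
    by_cases hx : PySem.Set.contains seen x = true
    · simp only [hx, if_true]; exact ih seen out
    · simp only [Bool.not_eq_true] at hx
      simp only [hx, Bool.false_eq_true, if_false]
      simp only [List.nil_append]
      obtain ⟨ho, hs⟩ := ih (PySem.Set.add seen x) (out ++ [x])
      obtain ⟨ho', hs'⟩ := ih (PySem.Set.add seen x) [x]
      exact ⟨by rw [ho, ho', List.append_assoc], by rw [hs, hs']⟩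

-- a foldl-append accumulator is flatMap
lemma pv_flat (l : List String) : ∀ acc : List String,
    l.foldl (fun acc f => acc ++ pvPM.getD f []) acc = acc ++ l.flatMap (fun f => pvPM.getD f []) := by
  induction l with
  | nil => intro acc; simp
  | cons x l ih => intro acc; simp [ih, List.flatMap_cons]

-- A's first loop builds exactly the flattened suggestion lists (a missing key contributes [])
lemma pv_loopA (l : List String) : ∀ acc : List String,
    l.foldl (fun acc f => if pvPM.contains f then acc ++ pvPM.getD f [] else acc) acc
      = acc ++ l.flatMap (fun f => pvPM.getD f []) := by
  induction l with
  | nil => intro acc; simp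
  | cons x l ih =>
    intro acc
    by_cases hx : pvPM.contains x = true
    · simp [hx, ih, List.flatMap_cons]
    · simp only [Bool.not_eq_true] at hx
      have : pvPM.getD x [] = [] := PySem.Dict.getD_of_not_contains pvPM [] hx
      simp [hx, ih, List.flatMap_cons, this]

-- MAIN: deduplicating the flattened suggestions = flattening the deduplicated factors
lemma pv_main (rf : List String) : ∀ (seen seenF : PySem.Set String),
    (∀ s, s ∈ seen ↔ ∃ g, g ∈ seenF ∧ s ∈ pvPM.getD g []) →
    ((rf.flatMap (fun f => pvPM.getD f [])).foldl pvAddU (seen, [])).2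
      = ((rf.foldl pvAddU (seenF, [])).2).flatMap (fun f => pvPM.getD f []) ∧
    (∀ s, s ∈ ((rf.flatMap (fun f => pvPM.getD f [])).foldl pvAddU (seen, [])).1 ↔
      ∃ g, g ∈ (rf.foldl pvAddU (seenF, [])).1 ∧ s ∈ pvPM.getD g []) := by
  induction rf with
  | nil => intro seen seenF hinv; exact ⟨rfl, hinv⟩
  | cons f rf ih =>
    intro seen seenF hinv
    rw [List.flatMap_cons, List.foldl_append, List.foldl_cons]
    by_cases hf : f ∈ seenF
    · -- factor already seen: its whole block is already in `seen`
      have hall : ∀ s ∈ pvPM.getD f [], s ∈ seen := by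
        intro s hs; exact (hinv s).2 ⟨f, hf, hs⟩
      rw [pv_foldl_seen (pvPM.getD f []) (seen, ([] : List String)) hall]
      have hcf : PySem.Set.contains seenF f = true := (PySem.Set.contains_iff _ _).2 hf
      show _ ∧ _
      simp only [pvAddU, hcf, if_true]
      exact ih seen seenF hinv
    · -- fresh factor: its whole block is fresh and duplicate-free
      have hfresh : ∀ s ∈ pvPM.getD f [], s ∉ seen := by
        intro s hs hmem
        obtain ⟨g, hg, hsg⟩ := (hinv s).1 hmem
        exact hf ((pv_disj f g s hs hsg) ▸ hg)
      obtain ⟨h2, h1⟩ := pv_foldl_new (pvPM.getD f []) (seen, []) (pv_nodup f) hfresh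
      have hcf : PySem.Set.contains seenF f = false := by
        rw [Bool.eq_false_iff]; intro hc; exact hf ((PySem.Set.contains_iff _ _).1 hc)
      simp only [pvAddU, hcf, Bool.false_eq_true, if_false, List.nil_append]
      -- split off the already-produced output on both sides
      obtain ⟨hoA, hsA⟩ := pv_foldl_out (rf.flatMap (fun f => pvPM.getD f []))
        ((pvPM.getD f []).foldl pvAddU (seen, [])).1 ((pvPM.getD f []).foldl pvAddU (seen, [])).2
      obtain ⟨hoB, hsB⟩ := pv_foldl_out rf (PySem.Set.add seenF f) [f]
      have hinv' : ∀ s, s ∈ ((pvPM.getD f []).foldl pvAddU (seen, [])).1 ↔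
          ∃ g, g ∈ PySem.Set.add seenF f ∧ s ∈ pvPM.getD g [] := by
        intro s
        rw [h1 s]
        constructor
        · rintro (h | h)
          · obtain ⟨g, hg, hsg⟩ := (hinv s).1 h
            exact ⟨g, (PySem.Set.mem_add _ _ _).2 (Or.inl hg), hsg⟩
          · exact ⟨f, (PySem.Set.mem_add _ _ _).2 (Or.inr rfl), h⟩
        · rintro ⟨g, hg, hsg⟩
          rcases (PySem.Set.mem_add _ _ _).1 hg with h | h
          · exact Or.inl ((hinv s).2 ⟨g, h, hsg⟩)
          · exact Or.inr (h ▸ hsg)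
      obtain ⟨iho, ihs⟩ := ih ((pvPM.getD f []).foldl pvAddU (seen, [])).1 (PySem.Set.add seenF f) hinv'
      constructor
      · have : ((pvPM.getD f []).foldl pvAddU (seen, [])) =
            (((pvPM.getD f []).foldl pvAddU (seen, [])).1, ((pvPM.getD f []).foldl pvAddU (seen, [])).2) := rfl
        rw [this, hoA, iho, hoB]
        simp [h2, List.flatMap_cons]
      · intro s
        have : ((pvPM.getD f []).foldl pvAddU (seen, [])) =
            (((pvPM.getD f []).foldl pvAddU (seen, [])).1, ((pvPM.getD f []).foldl pvAddU (seen, [])).2) := rfl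
        rw [this, hsA, ihs s, hsB]

-- running the factor-dedup fold with equal components keeps them equal and computes Set.ofList
lemma pv_dedup_fold (rf : List String) : ∀ s : PySem.Set String,
    (rf.foldl pvAddU (s, s)) = (rf.foldl PySem.Set.add s, rf.foldl PySem.Set.add s) := by
  induction rf with
  | nil => intro s; rfl
  | cons x rf ih =>
    intro s
    simp only [List.foldl_cons, pvAddU]
    by_cases hx : x ∈ s
    · have hc : PySem.Set.contains s x = true := (PySem.Set.contains_iff s x).2 hx
      have ha : PySem.Set.add s x = s := PySem.Set.add_of_mem hx
      simp only [hc, if_true, ha]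
      exact ih s
    · have hc : PySem.Set.contains s x = false := by
        rw [Bool.eq_false_iff]; exact fun hcc => hx ((PySem.Set.contains_iff s x).1 hcc)
      have ha : PySem.Set.add s x = s ++ [x] := PySem.Set.add_of_not_mem hx
      simp only [hc, Bool.false_eq_true, if_false, ha]
      exact ih (s ++ [x])

-- ===== VERDICT (by name: the statement is the Claim_ definition above) =====
theorem suggest_prevention_spec : Claim_equal_suggest_prevention := by
  intro rf _
  show suggest_prevention rf = suggest_prevention_alt rf
  unfold suggest_prevention suggest_prevention_alt
  rw [pv_loopA, pv_flat, List.nil_append, List.nil_append]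
  have hinv : ∀ s, s ∈ (PySem.Set.empty : PySem.Set String) ↔
      ∃ g, g ∈ (PySem.Set.empty : PySem.Set String) ∧ s ∈ pvPM.getD g [] := by
    simp [PySem.Set.empty]
  obtain ⟨hmain, hseen⟩ := pv_main rf PySem.Set.empty PySem.Set.empty hinv
  have hded : (rf.foldl pvAddU ((PySem.Set.empty : PySem.Set String), [])).2
      = PySem.List.dedup rf := by
    have := pv_dedup_fold rf (PySem.Set.empty : PySem.Set String)
    simp only [PySem.Set.empty] at this ⊢
    rw [this]
    rw [PySem.List.dedup_eq_ofList, PySem.Set.ofList_eq_foldl]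
  by_cases h3 : rf.length ≥ 3
  · simp only [h3, if_true]
    rw [List.foldl_append]
    simp only [List.foldl_cons, List.foldl_nil, pvAddU]
    have hplan : PySem.Set.contains ((rf.flatMap (fun f => pvPM.getD f [])).foldl pvAddU
        (PySem.Set.empty, [])).1 "Consider pausing for planning session" = false := by
      rw [Bool.eq_false_iff]
      intro hc
      obtain ⟨g, _, hsg⟩ := (hseen _).1 ((PySem.Set.contains_iff _ _).1 hc)
      exact pv_plan g hsg
    simp only [hplan, Bool.false_eq_true, if_false]
    rw [hmain, hded]
  · simp only [h3, if_false]
    rw [hmain, hded]
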